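-- pv_equiv track=rewrite | github.com/deathm1/coding_practice | leisure/ques1.py | sumofProduct
-- ===== SOURCE A (Python) =====
-- def combination(mylist,r):
--     if r == 0:
--         return [[]]
--     L = []
--     for i in range(0,len(mylist)):
--         first = mylist[i]
--         rem = mylist[i+1:]
--         combList = combination(rem,r-1)
--         for x in combList:
--             L.append([first]+x)
--     return L
--
-- def sumofProduct(N, A):
--     l=[]
--     out = 0
--     for i in range(1, A+1):
--         l.append(combination(N, i))
--         my_list = combination(N, i)
--
--         for elem in my_list:
--            out = out + max(elem) * min(elem)
--     return out
-- ===== SOURCE B (Python) =====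
-- def sumofProduct(N, A):
--     # One right-to-left pass over the sorted values; L[k] holds the sum of maxima
--     # over all (k+1)-element combinations of the suffix processed so far.
--     if A < 1:
--         return 0
--     total = 0
--     L = []
--     for x in reversed(sorted(N)):
--         total += x * x + x * sum(L[: A - 1])
--         L = [p + q for p, q in zip([x] + L, L + [0])]
--     return total
-- ===== Notes on version B (the rewrite author's own statement) =====
-- stated objective: faster
-- what changed: B replaces A's exponential enumeration of every combination of each size up to A by a single right-to-left pass over the sorted values that maintains, per subset size, the sum of subset maxima, adding x*x + x*(sum of those maxima) as each new minimum x arrives.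
import Mathlib
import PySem

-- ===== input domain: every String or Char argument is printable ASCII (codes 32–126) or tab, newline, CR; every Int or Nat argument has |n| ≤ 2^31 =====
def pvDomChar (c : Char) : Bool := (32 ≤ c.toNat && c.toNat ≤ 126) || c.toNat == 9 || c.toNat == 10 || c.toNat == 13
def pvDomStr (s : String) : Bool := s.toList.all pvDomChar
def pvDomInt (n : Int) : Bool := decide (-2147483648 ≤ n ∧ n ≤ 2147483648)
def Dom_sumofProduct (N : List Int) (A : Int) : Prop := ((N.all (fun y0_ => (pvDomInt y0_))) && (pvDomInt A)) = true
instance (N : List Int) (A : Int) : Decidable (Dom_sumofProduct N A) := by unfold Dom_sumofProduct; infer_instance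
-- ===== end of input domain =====

-- B replaces A's exponential enumeration of all combinations by one right-to-left
-- pass over the sorted values maintaining per-size sums of maxima (objective: faster).

-- ===== PORT A =====
-- combination(mylist, r): the i-loop is combLoop (i : Nat); mylist[i] is l[i] with
-- 0 ≤ i < len l, mylist[i+1:] is l.drop (i+1) — exact for these in-range values;
-- the two inner appends build block_i ++ (rest of the loop).
mutual
def combA (l : List Int) (r : Int) : List (List Int) :=
  if r = 0 then [[]] else combLoop l r 0
termination_by (l.length, l.length + 1)
decreasing_by exact Prod.Lex.right _ (by omega)
def combLoop (l : List Int) (r : Int) (i : Nat) : List (List Int) :=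
  if h : i < l.length then
    ((combA (l.drop (i+1)) (r-1)).map (fun x => l[i] :: x)) ++ combLoop l r (i+1)
  else []
termination_by (l.length, l.length - i)
decreasing_by
  · simp only [List.length_drop]; exact Prod.Lex.left _ _ (by omega)
  · exact Prod.Lex.right _ (by omega)
end

-- the Python local 'l' (list of all combination lists) is never read and is omitted;
-- max(elem)/min(elem) via max?/min? — elem is always nonempty, so the .getD default is never used.
def sumofProduct (N : List Int) (A : Int) : Int :=
  (PySem.List.pyRange 1 (A + 1) 1).foldl (fun out i =>
    (combA N i).foldl (fun out elem =>
      out + (PySem.List.max? elem (fun y => y)).getD 0 *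
            (PySem.List.min? elem (fun y => y)).getD 0) out) 0

-- ===== PORT B =====
def altStep (A : Int) (st : Int × List Int) (x : Int) : Int × List Int :=
  (st.1 + x * x + x * (PySem.List.slice st.2 none (some (A - 1))).sum,
   List.zipWith (· + ·) (x :: st.2) (st.2 ++ [0]))

def sumofProduct_alt (N : List Int) (A : Int) : Int :=
  if A < 1 then 0
  else (((PySem.List.sorted N (fun y => y) false).reverse).foldl (altStep A) (0, [])).1

-- ===== PRECONDITION & SPEC =====
def Spec_sumofProduct (N : List Int) (A : Int) (out : Int) : Prop := out = sumofProduct_alt N A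
instance (N : List Int) (A : Int) (out : Int) : Decidable (Spec_sumofProduct N A out) := by unfold Spec_sumofProduct; infer_instance

-- ===== CLAIM (what is proved, stated in full; the proofs are below) =====
def Claim_equal_sumofProduct : Prop := ∀ (N : List Int) (A : Int), Dom_sumofProduct N A → Spec_sumofProduct N A (sumofProduct N A)

-- ===== LEMMAS AND PROOFS =====

-- abbreviations for A's per-element value
def maxDD (c : List Int) : Int := (PySem.List.max? c (fun y => y)).getD 0
def fMM (c : List Int) : Int := maxDD c * (PySem.List.min? c (fun y => y)).getD 0
-- sum of fMM over all r-combinations / sum of maxima over all k-combinations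
def SA (l : List Int) (r : Int) : Int := ((combA l r).map fMM).sum
def LM (l : List Int) (k : Int) : Int := ((combA l k).map maxDD).sum
-- A's total for sizes 1..n
def Ssum (l : List Int) (n : Nat) : Int := ((List.range n).map (fun k : Nat => SA l (1 + (k : Int)))).sum

-- ===== structure of combA =====

theorem combLoop_shift (x : Int) (xs : List Int) (r : Int) :
    ∀ i, combLoop (x :: xs) r (i + 1) = combLoop xs r i := by
  intro i
  induction hn : xs.length - i generalizing i with
  | zero =>
    have h1 : ¬ (i + 1 < (x :: xs).length) := by simp only [List.length_cons]; omega
    have h2 : ¬ (i < xs.length) := by omega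
    conv_lhs => rw [combLoop]
    conv_rhs => rw [combLoop]
    rw [dif_neg h1, dif_neg h2]
  | succ n ih =>
    have h1 : i + 1 < (x :: xs).length := by simp only [List.length_cons]; omega
    have h2 : i < xs.length := by omega
    conv_lhs => rw [combLoop]
    conv_rhs => rw [combLoop]
    rw [dif_pos h1, dif_pos h2]
    have h3 : (x :: xs)[i + 1]'h1 = xs[i]'h2 := by simp
    have h4 : (x :: xs).drop (i + 1 + 1) = xs.drop (i + 1) := by
      simp [List.drop_succ_cons]
    rw [h3, h4, ih (i + 1) (by omega)]

theorem combA_zero (l : List Int) : combA l 0 = [[]] := by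
  rw [combA]; simp

theorem combA_nil (r : Int) (hr : r ≠ 0) : combA [] r = [] := by
  rw [combA, if_neg hr, combLoop, dif_neg (by simp)]

theorem combA_cons (x : Int) (xs : List Int) (r : Int) (hr : r ≠ 0) :
    combA (x :: xs) r = (combA xs (r - 1)).map (fun c => x :: c) ++ combA xs r := by
  have hxs : combA xs r = combLoop xs r 0 := by rw [combA, if_neg hr]
  conv_lhs => rw [combA]
  rw [if_neg hr]
  conv_lhs => rw [combLoop]
  rw [dif_pos (show (0 : Nat) < (x :: xs).length by simp)]
  rw [show (0 : Nat) + 1 = 1 from rfl, combLoop_shift x xs r 0, ← hxs]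
  simp

theorem combA_one (l : List Int) : combA l 1 = l.map (fun x => [x]) := by
  induction l with
  | nil => exact combA_nil 1 one_ne_zero
  | cons x xs ih =>
    rw [combA_cons x xs 1 one_ne_zero, ih]
    norm_num [combA_zero]

theorem combA_eq_nil_of_lt (l : List Int) : ∀ r : Int, (l.length : Int) < r → combA l r = [] := by
  induction l with
  | nil => intro r hr; exact combA_nil r (by omega)
  | cons x xs ih =>
    intro r hr
    simp only [List.length_cons] at hr
    rw [combA_cons x xs r (by push_cast at hr ⊢; omega)]
    rw [ih (r - 1) (by push_cast at hr ⊢; omega), ih r (by push_cast at hr ⊢; omega)]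
    simp

theorem mem_combA_sublist {c l : List Int} {r : Int} (h : c ∈ combA l r) : c.Sublist l := by
  induction l generalizing c r with
  | nil =>
    by_cases hr : r = 0
    · subst hr; rw [combA_zero] at h; simp at h; simp [h]
    · rw [combA_nil r hr] at h; simp at h
  | cons x xs ih =>
    by_cases hr : r = 0
    · subst hr; rw [combA_zero] at h; simp at h; simp [h]
    · rw [combA_cons x xs r hr] at h
      rcases List.mem_append.1 h with h1 | h2
      · rcases List.mem_map.1 h1 with ⟨c', hc', rfl⟩
        exact List.Sublist.cons₂ x (ih hc')
      · exact List.Sublist.cons x (ih h2)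

theorem mem_combA_ne_nil {c l : List Int} {r : Int} (h : c ∈ combA l r) (hr : r ≠ 0) : c ≠ [] := by
  induction l generalizing c r with
  | nil => rw [combA_nil r hr] at h; simp at h
  | cons x xs ih =>
    rw [combA_cons x xs r hr] at h
    rcases List.mem_append.1 h with h1 | h2
    · rcases List.mem_map.1 h1 with ⟨c', hc', rfl⟩; simp
    · exact ih h2 hr

-- ===== max / min facts =====

theorem maxDD_perm {c c' : List Int} (h : c.Perm c') : maxDD c = maxDD c' := by
  rcases eq_or_ne c [] with rfl | hc
  · rw [h.symm.eq_nil]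
  · have hc' : c' ≠ [] := fun hn => hc (List.Perm.eq_nil (hn ▸ h))
    obtain ⟨m, hm⟩ : ∃ m, PySem.List.max? c (fun y => y) = some m := by
      cases hx : PySem.List.max? c (fun y => y) with
      | none => exact absurd ((PySem.List.max?_eq_none_iff _ _).1 hx) hc
      | some m => exact ⟨m, rfl⟩
    obtain ⟨m', hm'⟩ : ∃ m', PySem.List.max? c' (fun y => y) = some m' := by
      cases hx : PySem.List.max? c' (fun y => y) with
      | none => exact absurd ((PySem.List.max?_eq_none_iff _ _).1 hx) hc'
      | some m => exact ⟨m, rfl⟩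
    have h1 : m ≤ m' := PySem.List.max?_isMax hm' m (h.mem_iff.1 (PySem.List.max?_mem hm))
    have h2 : m' ≤ m := PySem.List.max?_isMax hm m' (h.mem_iff.2 (PySem.List.max?_mem hm'))
    simp [maxDD, hm, hm', le_antisymm h1 h2]

theorem minD_perm {c c' : List Int} (h : c.Perm c') :
    (PySem.List.min? c (fun y => y)).getD 0 = (PySem.List.min? c' (fun y => y)).getD 0 := by
  rcases eq_or_ne c [] with rfl | hc
  · rw [h.symm.eq_nil]
  · have hc' : c' ≠ [] := fun hn => hc (List.Perm.eq_nil (hn ▸ h))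
    obtain ⟨m, hm⟩ : ∃ m, PySem.List.min? c (fun y => y) = some m := by
      cases hx : PySem.List.min? c (fun y => y) with
      | none => exact absurd ((PySem.List.min?_eq_none_iff _ _).1 hx) hc
      | some m => exact ⟨m, rfl⟩
    obtain ⟨m', hm'⟩ : ∃ m', PySem.List.min? c' (fun y => y) = some m' := by
      cases hx : PySem.List.min? c' (fun y => y) with
      | none => exact absurd ((PySem.List.min?_eq_none_iff _ _).1 hx) hc'
      | some m => exact ⟨m, rfl⟩
    have h1 : m' ≤ m := PySem.List.min?_isMin hm' m (h.mem_iff.1 (PySem.List.min?_mem hm))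
    have h2 : m ≤ m' := PySem.List.min?_isMin hm m' (h.mem_iff.2 (PySem.List.min?_mem hm'))
    simp [hm, hm', le_antisymm h2 h1]

theorem fMM_perm {c c' : List Int} (h : c.Perm c') : fMM c = fMM c' := by
  unfold fMM
  rw [maxDD_perm h, minD_perm h]

theorem maxDD_singleton (y : Int) : maxDD [y] = y := by
  simp [maxDD, PySem.List.max?_id_cons]

theorem fMM_singleton (y : Int) : fMM [y] = y * y := by
  simp [fMM, maxDD_singleton, PySem.List.min?_id_cons]

theorem minD_cons_of_le (x : Int) (c : List Int) (hx : ∀ y ∈ c, x ≤ y) :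
    (PySem.List.min? (x :: c) (fun y => y)).getD 0 = x := by
  rw [PySem.List.min?_id_cons]
  have h1 := (PySem.List.foldl_min_le c x).1
  have h2 : c.foldl min x = x ∨ c.foldl min x ∈ c := PySem.List.foldl_min_mem c x
  rcases h2 with h2 | h2
  · simp [h2]
  · simp [le_antisymm h1 (hx _ h2)]

theorem maxDD_cons_of_le (x b : Int) (t : List Int) (hxb : x ≤ b) :
    maxDD (x :: b :: t) = maxDD (b :: t) := by
  simp [maxDD, PySem.List.max?_id_cons, List.foldl, max_eq_right hxb]

-- ===== permutation invariance of SA =====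

def MM (l : List Int) (r : Int) : Multiset (Multiset Int) :=
  Multiset.ofList ((combA l r).map (fun c => Multiset.ofList c))

theorem MM_zero (l : List Int) : MM l 0 = {(0 : Multiset Int)} := by
  unfold MM
  rw [combA_zero]
  rfl

theorem MM_cons (x : Int) (t : List Int) (r : Int) (hr : r ≠ 0) :
    MM (x :: t) r = (MM t (r - 1)).map (fun m => x ::ₘ m) + MM t r := by
  unfold MM
  rw [combA_cons x t r hr]
  rw [List.map_append, ← Multiset.coe_add, Multiset.map_coe, List.map_map]
  congr 1
  simp [Function.comp_def]

theorem MM_perm {l l' : List Int} (h : l.Perm l') : ∀ r, MM l r = MM l' r := by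
  induction h with
  | nil => intro r; rfl
  | cons x h ih =>
    intro r
    by_cases hr : r = 0
    · subst hr; rw [MM_zero, MM_zero]
    · rw [MM_cons _ _ _ hr, MM_cons _ _ _ hr, ih, ih]
  | swap x y t =>
    intro r
    by_cases hr : r = 0
    · subst hr; rw [MM_zero, MM_zero]
    by_cases hr1 : r - 1 = 0
    · have hr' : r = 1 := by omega
      subst hr'
      rw [MM_cons y (x :: t) 1 one_ne_zero, MM_cons x (y :: t) 1 one_ne_zero,
        MM_cons x t 1 one_ne_zero, MM_cons y t 1 one_ne_zero]
      simp only [show (1 : Int) - 1 = 0 from rfl, MM_zero, Multiset.map_singleton]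
      abel
    · rw [MM_cons y (x :: t) r hr, MM_cons x (y :: t) r hr,
        MM_cons x t (r - 1) hr1, MM_cons y t (r - 1) hr1,
        MM_cons x t r hr, MM_cons y t r hr]
      simp only [Multiset.map_add, Multiset.map_map, Function.comp]
      have hsw : ∀ m : Multiset Int, y ::ₘ x ::ₘ m = x ::ₘ y ::ₘ m := fun m => Multiset.cons_swap y x m
      simp only [hsw]
      abel
  | trans h1 h2 ih1 ih2 => intro r; rw [ih1, ih2]

def gMM (m : Multiset Int) : Int := fMM (m.sort (· ≤ ·))

theorem SA_eq_MM (l : List Int) (r : Int) : SA l r = ((MM l r).map gMM).sum := by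
  unfold SA MM
  rw [Multiset.map_coe, Multiset.sum_coe, List.map_map]
  refine congrArg List.sum (List.map_congr_left fun c _ => ?_)
  have hp : ((Multiset.ofList c).sort (· ≤ ·)).Perm c :=
    Multiset.coe_eq_coe.1 (Multiset.sort_eq (Multiset.ofList c) (· ≤ ·))
  exact (fMM_perm hp).symm

theorem SA_perm {l l' : List Int} (h : l.Perm l') (r : Int) : SA l r = SA l' r := by
  rw [SA_eq_MM, SA_eq_MM, MM_perm h r]

-- ===== small sum helpers =====

theorem sum_map_mul_left {α : Type} (l : List α) (x : Int) (f : α → Int) :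
    (l.map (fun a => x * f a)).sum = x * (l.map f).sum := by
  induction l with
  | nil => simp
  | cons a t ih => simp [ih]; ring

theorem sum_map_add {α : Type} (l : List α) (f g : α → Int) :
    (l.map (fun a => f a + g a)).sum = (l.map f).sum + (l.map g).sum := by
  induction l with
  | nil => simp
  | cons a t ih => simp [ih]; ring

theorem sum_map_range_zero_ge (f : Nat → Int) (n : Nat) (hf : ∀ k, n ≤ k → f k = 0) :
    ∀ m, n ≤ m → ((List.range m).map f).sum = ((List.range n).map f).sum := by
  intro m hm
  induction m with
  | zero => cases Nat.le_zero.1 hm; rfl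
  | succ m' ih =>
    rcases Nat.lt_or_ge n (m' + 1) with h | h
    · rw [List.range_succ, List.map_append, List.sum_append, ih (by omega)]
      simp [hf m' (by omega)]
    · have : n = m' + 1 := le_antisymm hm h
      rw [this]

theorem sum_map_range_min (f : Nat → Int) (n m : Nat) (hf : ∀ k, n ≤ k → f k = 0) :
    ((List.range (min m n)).map f).sum = ((List.range m).map f).sum := by
  rcases le_total m n with h | h
  · rw [min_eq_left h]
  · rw [min_eq_right h]
    exact (sum_map_range_zero_ge f n hf m h).symm

-- ===== recursions on a sorted list =====

theorem SA_one (l : List Int) : SA l 1 = (l.map (fun y => y * y)).sum := by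
  unfold SA
  rw [combA_one, List.map_map]
  simp [Function.comp_def, fMM_singleton]

theorem LM_one (l : List Int) : LM l 1 = l.sum := by
  unfold LM
  rw [combA_one, List.map_map]
  simp [Function.comp_def, maxDD_singleton]

theorem LM_eq_zero_of_lt (l : List Int) (k : Int) (h : (l.length : Int) < k) : LM l k = 0 := by
  unfold LM
  rw [combA_eq_nil_of_lt l k h]
  rfl

theorem SA_cons (x : Int) (xs : List Int) (r : Int) (hr : 2 ≤ r) (hx : ∀ y ∈ xs, x ≤ y) :
    SA (x :: xs) r = x * LM xs (r - 1) + SA xs r := by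
  have hr0 : r ≠ 0 := by omega
  have hr1 : r - 1 ≠ 0 := by omega
  unfold SA LM
  rw [combA_cons x xs r hr0, List.map_append, List.sum_append, List.map_map]
  congr 1
  have hmap : (combA xs (r - 1)).map (fMM ∘ fun c => x :: c) =
      (combA xs (r - 1)).map (fun c => x * maxDD c) := by
    refine List.map_congr_left fun c hc => ?_
    obtain ⟨b, t, rfl⟩ : ∃ b t, c = b :: t := by
      rcases c with _ | ⟨b, t⟩
      · exact absurd rfl (mem_combA_ne_nil hc hr1)
      · exact ⟨b, t, rfl⟩
    have hsub : ∀ y ∈ b :: t, x ≤ y := fun y hy => hx y ((mem_combA_sublist hc).subset hy)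
    show fMM (x :: b :: t) = x * maxDD (b :: t)
    unfold fMM
    rw [maxDD_cons_of_le x b t (hsub b (by simp)), minD_cons_of_le x (b :: t) hsub]
    ring
  rw [hmap, sum_map_mul_left]

theorem LM_cons (x : Int) (xs : List Int) (k : Int) (hk : 2 ≤ k) (hx : ∀ y ∈ xs, x ≤ y) :
    LM (x :: xs) k = LM xs (k - 1) + LM xs k := by
  have hk0 : k ≠ 0 := by omega
  have hk1 : k - 1 ≠ 0 := by omega
  unfold LM
  rw [combA_cons x xs k hk0, List.map_append, List.sum_append, List.map_map]
  congr 1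
  refine congrArg List.sum (List.map_congr_left fun c hc => ?_)
  obtain ⟨b, t, rfl⟩ : ∃ b t, c = b :: t := by
    rcases c with _ | ⟨b, t⟩
    · exact absurd rfl (mem_combA_ne_nil hc hk1)
    · exact ⟨b, t, rfl⟩
  exact maxDD_cons_of_le x b t (hx b ((mem_combA_sublist hc).subset (by simp)))

-- ===== A's value as Ssum =====

theorem sumofProduct_eq_Ssum (N : List Int) (A : Int) :
    sumofProduct N A = Ssum N A.toNat := by
  unfold sumofProduct Ssum SA fMM maxDD
  simp only [PySem.List.foldl_add]
  rw [PySem.List.pyRange_one]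
  simp only [add_sub_cancel_right, List.map_map]
  simp [Function.comp_def]

theorem Ssum_cons (x : Int) (xs : List Int) (m : Nat) (hx : ∀ y ∈ xs, x ≤ y) :
    Ssum (x :: xs) (m + 1) =
      x * x + x * ((List.range m).map (fun k : Nat => LM xs (1 + (k : Int)))).sum + Ssum xs (m + 1) := by
  have hx1 : SA (x :: xs) 1 = x * x + SA xs 1 := by
    rw [SA_one, SA_one]; simp
  have hterm : ∀ k : Nat, SA (x :: xs) (1 + ((k + 1 : Nat) : Int)) =
      x * LM xs (1 + (k : Int)) + SA xs (1 + ((k + 1 : Nat) : Int)) := by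
    intro k
    rw [SA_cons x xs (1 + ((k + 1 : Nat) : Int)) (by omega) hx]
    rw [show (1 + ((k + 1 : Nat) : Int)) - 1 = 1 + (k : Int) by push_cast; ring]
  unfold Ssum
  rw [List.range_succ_eq_map, List.map_cons, List.sum_cons, List.map_map,
    List.map_cons, List.sum_cons, List.map_map]
  simp only [Function.comp_def, Nat.succ_eq_add_one]
  rw [List.map_congr_left (fun k _ => hterm k), sum_map_add, sum_map_mul_left]
  simp only [Nat.cast_zero, add_zero] at hx1 ⊢
  rw [hx1]
  ring

-- ===== B's loop invariant =====

theorem alt_invariant (A : Int) (hA : 1 ≤ A) :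
    ∀ S : List Int, S.Pairwise (· ≤ ·) →
      S.foldr (fun x st => altStep A st x) (0, []) =
        (Ssum S A.toNat, (List.range S.length).map (fun j : Nat => LM S (1 + (j : Int)))) := by
  intro S hp
  induction S with
  | nil =>
    have h0 : ∀ k : Nat, SA [] (1 + (k : Int)) = 0 := by
      intro k
      unfold SA
      rw [combA_nil _ (by omega)]
      rfl
    simp [Ssum, h0, List.foldr]
  | cons x xs ih =>
    have hx : ∀ y ∈ xs, x ≤ y := (List.pairwise_cons.1 hp).1
    have hs : xs.Pairwise (· ≤ ·) := (List.pairwise_cons.1 hp).2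
    rw [List.foldr_cons, ih hs]
    have hLfun : ∀ k : Nat, xs.length ≤ k → LM xs (1 + (k : Int)) = 0 := fun k hk =>
      LM_eq_zero_of_lt xs _ (by omega)
    set n := xs.length with hnn
    set L := (List.range n).map (fun j : Nat => LM xs (1 + (j : Int))) with hL
    have hLlen : L.length = n := by simp [hL]
    have hB : ∀ (j : Nat) (hj : j < n + 1), (L ++ [0])[j]'(by simp [hLlen]; omega) = LM xs (1 + (j : Int)) := by
      intro j hj
      rcases Nat.lt_or_ge j n with h | h
      · rw [List.getElem_append_left (by omega)]
        simp [hL]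
      · have hjn : j = n := by omega
        subst hjn
        rw [List.getElem_append_right (by omega)]
        simp [hLlen]
        exact (hLfun _ le_rfl).symm
    have hcomp2 : List.zipWith (· + ·) (x :: L) (L ++ [0]) =
        (List.range (n + 1)).map (fun j : Nat => LM (x :: xs) (1 + (j : Int))) := by
      apply List.ext_getElem
      · simp [hLlen]
      · intro j hj1 hj2
        have hj : j < n + 1 := by simpa [hLlen] using hj1
        rw [List.getElem_zipWith]
        rw [List.getElem_map, List.getElem_range]
        cases j with
        | zero =>
          show x + (L ++ [0])[0]'_ = LM (x :: xs) (1 + ((0 : Nat) : Int))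
          rw [hB 0 (by omega)]
          simp only [Nat.cast_zero, add_zero]
          rw [LM_one, LM_one, List.sum_cons]
        | succ k =>
          have hk : k < n := by omega
          show (x :: L)[k + 1]'_ + (L ++ [0])[k + 1]'_ = LM (x :: xs) (1 + ((k + 1 : Nat) : Int))
          rw [List.getElem_cons_succ, hB (k + 1) (by omega)]
          have : L[k]'(by omega) = LM xs (1 + (k : Int)) := by simp [hL]
          rw [this]
          rw [LM_cons x xs (1 + ((k + 1 : Nat) : Int)) (by omega) hx]
          rw [show (1 + ((k + 1 : Nat) : Int)) - 1 = 1 + (k : Int) by push_cast; ring]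
    have hcomp1 : Ssum xs A.toNat + x * x +
        x * (PySem.List.slice L none (some (A - 1))).sum = Ssum (x :: xs) A.toNat := by
      rw [PySem.List.slice_to L (show (0 : Int) ≤ A - 1 by omega)]
      have htake : (L.take (A - 1).toNat).sum =
          ((List.range (A - 1).toNat).map (fun k : Nat => LM xs (1 + (k : Int)))).sum := by
        rw [hL, ← List.map_take, List.take_range]
        exact sum_map_range_min _ n _ hLfun
      have hAnat : A.toNat = (A - 1).toNat + 1 := by omega
      rw [htake, hAnat, Ssum_cons x xs (A - 1).toNat hx]
      ring
    show altStep A (Ssum xs A.toNat, L) x = _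
    unfold altStep
    simp only [List.length_cons]
    exact Prod.ext (by simpa using hcomp1) (by simpa using hcomp2)

-- ===== VERDICT (by name: the statement is the Claim_ definition above) =====
theorem sumofProduct_spec : Claim_equal_sumofProduct := by
  unfold Claim_equal_sumofProduct
  intro N A _
  unfold Spec_sumofProduct sumofProduct_alt
  by_cases hA : A < 1
  · rw [if_pos hA]
    unfold sumofProduct
    rw [PySem.List.pyRange_one_eq_nil (by omega)]
    rfl
  · rw [if_neg hA]
    rw [not_lt] at hA
    rw [List.foldl_reverse]
    have hsort : (PySem.List.sorted N (fun y => y) false).Pairwise (· ≤ ·) := by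
      simpa using PySem.List.sorted_pairwise N (fun y => y)
    rw [alt_invariant A hA _ hsort]
    rw [sumofProduct_eq_Ssum N A]
    unfold Ssum
    refine congrArg List.sum (List.map_congr_left fun k _ => ?_)
    exact SA_perm (PySem.List.sorted_perm N (fun y => y) false).symm _
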